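-- pv_equiv track=rewrite | github.com/pat-lp/Cursos-de-Python | Programación En Python UNSAM/Clase 06/Ejercicio 6-02 Propagar como el auto fantástico.py | propagar_a_derecha_
-- ===== SOURCE A (Python) =====
-- def propagar_a_derecha_(l):
--     copiaLista=l.copy()
--     n = len(copiaLista)
--     for i,e in enumerate(copiaLista):
--         if e==1 and i<n-1:
--             if copiaLista[i+1]==0:
--                 copiaLista[i+1] = 1
--     return copiaLista
-- ===== SOURCE B (Python) =====
-- def propagar_a_derecha_(l):
--     res = []
--     fill = False
--     for e in l:
--         v = 1 if (fill and e == 0) else e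
--         res.append(v)
--         fill = (v == 1)
--     return res
-- ===== Notes on version B (the rewrite author's own statement) =====
-- stated objective: simpler
-- what changed: Replaces the index-based in-place mutation cascade (writing 1 into the next slot and re-reading it via enumerate) by a single forward scan that builds a fresh output list while carrying an explicit boolean fill state.
import Mathlib
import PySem

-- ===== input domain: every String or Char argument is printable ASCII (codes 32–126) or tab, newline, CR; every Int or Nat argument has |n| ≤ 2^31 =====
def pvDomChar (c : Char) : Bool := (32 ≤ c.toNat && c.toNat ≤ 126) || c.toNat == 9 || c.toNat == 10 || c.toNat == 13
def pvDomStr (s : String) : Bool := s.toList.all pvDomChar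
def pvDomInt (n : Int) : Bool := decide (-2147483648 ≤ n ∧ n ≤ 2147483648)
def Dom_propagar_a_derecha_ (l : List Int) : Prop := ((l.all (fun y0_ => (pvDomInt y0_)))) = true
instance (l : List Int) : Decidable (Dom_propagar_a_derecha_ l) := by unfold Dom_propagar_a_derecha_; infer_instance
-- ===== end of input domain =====

-- B builds a fresh list in one scan with an explicit boolean fill state, instead of A's
-- index-based in-place mutation cascade re-read through enumerate.  Objective: simpler.
-- A does not mutate its argument (it copies first), so return-value equivalence is the whole story.

-- ===== PORT A =====
-- A's loop reads copiaLista[i] (the possibly already-mutated value) at index i and may set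
-- index i+1; ported as an index loop over the n = len(l) enumerate steps (the first argument
-- counts the remaining iterations), carrying the list as mutable state.  All index accesses
-- are in range, so getD/set are exact for Python's reads and writes here.
def pvLoopA : Nat → List Int → Nat → List Int
  | 0, c, _ => c
  | fuel + 1, c, i =>
    let e := c.getD i 0
    let c' := if e = 1 ∧ i < c.length - 1 then
        (if c.getD (i + 1) 0 = 0 then c.set (i + 1) 1 else c)
      else c
    pvLoopA fuel c' (i + 1)

def propagar_a_derecha_ (l : List Int) : List Int := pvLoopA l.length l 0

-- ===== PORT B =====
def pvScanB (fill : Bool) : List Int → List Int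
  | [] => []
  | e :: r =>
    let v : Int := if fill && e == 0 then 1 else e
    v :: pvScanB (v == 1) r

def propagar_a_derecha__alt (l : List Int) : List Int := pvScanB false l

-- ===== PRECONDITION & SPEC =====
def Spec_propagar_a_derecha_ (l : List Int) (out : List Int) : Prop := out = propagar_a_derecha__alt l
instance (l : List Int) (out : List Int) : Decidable (Spec_propagar_a_derecha_ l out) := by unfold Spec_propagar_a_derecha_; infer_instance

-- ===== CLAIM (what is proved, stated in full; the proofs are below) =====
def Claim_equal_propagar_a_derecha_ : Prop := ∀ (l : List Int), Dom_propagar_a_derecha_ l → Spec_propagar_a_derecha_ l (propagar_a_derecha_ l)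

-- ===== LEMMAS AND PROOFS =====

theorem pvLoopA_zero (c : List Int) (i : Nat) : pvLoopA 0 c i = c := rfl

theorem pvLoopA_succ (fuel : Nat) (c : List Int) (i : Nat) :
    pvLoopA (fuel + 1) c i =
      pvLoopA fuel
        (if c.getD i 0 = 1 ∧ i < c.length - 1 then
            (if c.getD (i + 1) 0 = 0 then c.set (i + 1) 1 else c)
          else c)
        (i + 1) := rfl

theorem pv_getD_at (p : List Int) (e : Int) (t : List Int) :
    (p ++ e :: t).getD p.length 0 = e := by
  induction p with
  | nil => simp
  | cons a p ih => simpa using ih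

theorem pv_set_at (p : List Int) (x : Int) (r : List Int) (v : Int) :
    (p ++ x :: r).set p.length v = p ++ v :: r := by
  induction p with
  | nil => simp
  | cons a p ih => simpa using ih

theorem pv_loopA_eq : ∀ (t p : List Int) (e : Int),
    pvLoopA (t.length + 1) (p ++ e :: t) p.length = p ++ e :: pvScanB (e == 1) t := by
  intro t
  induction t with
  | nil =>
    intro p e
    rw [List.length_nil, pvLoopA_succ]
    have hcond : ¬ ((p ++ e :: ([] : List Int)).getD p.length 0 = 1 ∧
        p.length < (p ++ e :: ([] : List Int)).length - 1) := by
      simp only [List.length_append, List.length_cons, List.length_nil]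
      omega
    rw [if_neg hcond, pvLoopA_zero]
    simp [pvScanB]
  | cons x r ih =>
    intro p e
    rw [List.length_cons, pvLoopA_succ, pv_getD_at]
    have hcond : e = 1 ∧ p.length < (p ++ e :: x :: r).length - 1 ↔ e = 1 := by
      simp only [List.length_append, List.length_cons]
      omega
    have hx1 : (p ++ e :: x :: r).getD (p.length + 1) 0 = x := by
      have := pv_getD_at (p ++ [e]) x r
      simpa using this
    by_cases he : e = 1
    · rw [if_pos (hcond.mpr he)]
      by_cases hx : x = 0
      · rw [if_pos (by rw [hx1, hx])]
        have hset : (p ++ e :: x :: r).set (p.length + 1) 1 = (p ++ [e]) ++ (1 : Int) :: r := by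
          have := pv_set_at (p ++ [e]) x r 1
          simpa using this
        rw [hset]
        have h2 := ih (p ++ [e]) 1
        simp only [List.length_append, List.length_cons, List.length_nil] at h2 ⊢
        rw [h2]
        simp [pvScanB, he, hx]
      · rw [if_neg (by rw [hx1]; exact hx)]
        have hsplit : p ++ e :: x :: r = (p ++ [e]) ++ x :: r := by simp
        rw [hsplit]
        have h2 := ih (p ++ [e]) x
        simp only [List.length_append, List.length_cons, List.length_nil] at h2 ⊢
        rw [h2]
        simp [pvScanB, he, hx]
    · rw [if_neg (fun h => he (hcond.mp h))]
      have hsplit : p ++ e :: x :: r = (p ++ [e]) ++ x :: r := by simp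
      rw [hsplit]
      have h2 := ih (p ++ [e]) x
      simp only [List.length_append, List.length_cons, List.length_nil] at h2 ⊢
      rw [h2]
      simp [pvScanB, he]

-- ===== VERDICT (by name: the statement is the Claim_ definition above) =====
theorem propagar_a_derecha__spec : Claim_equal_propagar_a_derecha_ := by
  unfold Claim_equal_propagar_a_derecha_
  intro l _
  unfold Spec_propagar_a_derecha_ propagar_a_derecha_ propagar_a_derecha__alt
  cases l with
  | nil => rfl
  | cons e t =>
    have h := pv_loopA_eq t [] e
    simp only [List.nil_append, List.length_nil] at h
    simpa [pvScanB] using h
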